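-- pv_equiv track=rewrite | github.com/acthiago/app | app/services/ai_categorization.py | generate_tags_by_keywords
-- ===== SOURCE A (Python) =====
-- from typing import Optional, List
--
-- def generate_tags_by_keywords(title: str) -> List[str]:
--     """
--     Geração simples de tags baseada em palavras-chave (fallback)
--     """
--     # Palavras comuns a ignorar
--     stop_words = {
--         'de', 'da', 'do', 'com', 'para', 'em', 'a', 'o', 'e', 'ou',
--         'kit', 'c/', 'pc', 'un', 'cx', 'cor', 'cm', 'mm', 'kg', 'g'
--     }
--
--     # Extrair palavras do título
--     words = title.lower().split()
--
--     # Filtrar palavras relevantes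
--     tags = []
--     for word in words:
--         # Remover pontuação
--         word = ''.join(c for c in word if c.isalnum() or c in ['-', '_'])
--
--         # Adicionar se for relevante
--         if (len(word) > 2 and
--             word not in stop_words and
--             not word.isdigit()):
--             tags.append(word)
--
--     # Limitar a 5 tags únicas
--     return list(dict.fromkeys(tags))[:5]
-- ===== SOURCE B (Python) =====
-- def generate_tags_by_keywords(title: str):
--     stop_words = {
--         'de', 'da', 'do', 'com', 'para', 'em', 'a', 'o', 'e', 'ou',
--         'kit', 'c/', 'pc', 'un', 'cx', 'cor', 'cm', 'mm', 'kg', 'g'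
--     }
--     result = []
--     for word in title.lower().split():
--         w = ''.join(c for c in word if c.isalnum() or c in ['-', '_'])
--         if (len(w) > 2 and w not in stop_words and not w.isdigit()
--                 and w not in result):
--             result.append(w)
--             if len(result) == 5:
--                 break
--     return result
-- ===== Notes on version B (the rewrite author's own statement) =====
-- stated objective: simpler
-- what changed: Single pass that deduplicates and truncates inside the loop (membership check against the result list plus break at 5 tags), instead of collecting all tags and post-processing with dict.fromkeys and a slice.
import Mathlib
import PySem

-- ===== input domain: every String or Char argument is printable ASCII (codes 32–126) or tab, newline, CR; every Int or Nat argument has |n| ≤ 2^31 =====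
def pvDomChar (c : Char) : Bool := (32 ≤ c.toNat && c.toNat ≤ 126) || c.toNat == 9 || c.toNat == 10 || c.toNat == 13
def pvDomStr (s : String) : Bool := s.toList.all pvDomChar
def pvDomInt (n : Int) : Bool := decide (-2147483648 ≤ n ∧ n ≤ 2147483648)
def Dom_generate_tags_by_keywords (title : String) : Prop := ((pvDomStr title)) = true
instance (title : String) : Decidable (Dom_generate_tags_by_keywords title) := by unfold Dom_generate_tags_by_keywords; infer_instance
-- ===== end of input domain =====

-- B folds A's dedup (dict.fromkeys) and [:5] slice into the single pass itself (membership test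
-- against the growing result, break at 5 tags); objective: simpler/alternative decomposition.

-- shared helpers: the stop-word set, the per-word cleaning, and the relevance predicate
-- (identical in both Pythons, so shared by both ports)
def pvStopWords : List (List Char) :=
  ["de", "da", "do", "com", "para", "em", "a", "o", "e", "ou",
   "kit", "c/", "pc", "un", "cx", "cor", "cm", "kg", "g", "mm"].map String.toList

def pvClean (w : List Char) : List Char :=
  w.filter (fun c => PySem.Chars.isalnum c || c == '-' || c == '_')

def pvKeep (w : List Char) : Bool :=
  decide (w.length > 2) && !(pvStopWords.contains w) && !(PySem.Chars.strIsdigit w)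

-- ===== PORT A =====
def generate_tags_by_keywords (title : String) : List String :=
  let words := PySem.Chars.split₀ (PySem.Chars.lower title.toList)
  let tags := words.foldl (fun acc w =>
    let c := pvClean w
    if pvKeep c then acc ++ [c] else acc) []
  ((PySem.List.dedup tags).take 5).map String.ofList

-- ===== PORT B =====
def pvAltLoop : List (List Char) → List (List Char) → List (List Char)
  | [], result => result
  | w :: rest, result =>
    let c := pvClean w
    if pvKeep c && !(result.contains c) then
      let r := result ++ [c]
      if r.length == 5 then r else pvAltLoop rest r
    else pvAltLoop rest result

def generate_tags_by_keywords_alt (title : String) : List String :=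
  (pvAltLoop (PySem.Chars.split₀ (PySem.Chars.lower title.toList)) []).map String.ofList

-- ===== PRECONDITION & SPEC =====
def Spec_generate_tags_by_keywords (title : String) (out : List String) : Prop := out = generate_tags_by_keywords_alt title
instance (title : String) (out : List String) : Decidable (Spec_generate_tags_by_keywords title out) := by unfold Spec_generate_tags_by_keywords; infer_instance

-- ===== CLAIM (what is proved, stated in full; the proofs are below) =====
def Claim_equal_generate_tags_by_keywords : Prop := ∀ (title : String), Dom_generate_tags_by_keywords title → Spec_generate_tags_by_keywords title (generate_tags_by_keywords title)

-- ===== LEMMAS AND PROOFS =====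

-- once the result has 5 entries, updating the set only appends, so take 5 gives it back
theorem pvTake5_update (r xs : List (List Char)) (h : r.length = 5) :
    (PySem.Set.update r xs).take 5 = r := by
  rw [PySem.Set.update_eq_append_filter]
  exact List.take_left' h

-- loop invariant: B's loop computes take-5 of the set-update of the current result
theorem pvAltLoop_eq (ws : List (List Char)) :
    ∀ (result : List (List Char)), result.length < 5 →
    pvAltLoop ws result
      = (PySem.Set.update result ((ws.filter (fun w => pvKeep (pvClean w))).map pvClean)).take 5 := by
  induction ws with
  | nil =>
      intro result h
      simp only [pvAltLoop, List.filter_nil, List.map_nil, PySem.Set.update_nil]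
      exact (List.take_of_length_le (by omega)).symm
  | cons w rest ih =>
      intro result h
      by_cases hk : pvKeep (pvClean w) = true
      · rw [List.filter_cons_of_pos (p := fun w => pvKeep (pvClean w)) hk, List.map_cons,
            PySem.Set.update_cons]
        by_cases hm : (pvClean w) ∈ result
        · have hadd : PySem.Set.add result (pvClean w) = result := by
            simp [PySem.Set.add, PySem.Set.contains, hm]
          have hc : result.contains (pvClean w) = true := by simpa using hm
          rw [hadd]
          simp only [pvAltLoop, hk, hc]
          simpa using ih result h
        · have hadd : PySem.Set.add result (pvClean w) = result ++ [pvClean w] := by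
            simp [PySem.Set.add, PySem.Set.contains, hm]
          have hc : result.contains (pvClean w) = false := by simpa using hm
          rw [hadd]
          simp only [pvAltLoop, hk, hc]
          by_cases h5 : (result ++ [pvClean w]).length = 5
          · have hb : ((result ++ [pvClean w]).length == 5) = true := by simp [h5]
            simp only [hb]
            simpa using (pvTake5_update _ _ h5).symm
          · have hb : ((result ++ [pvClean w]).length == 5) = false := by
              rw [beq_eq_false_iff_ne]; exact h5
            have hlt : (result ++ [pvClean w]).length < 5 := by
              simp only [List.length_append, List.length_cons, List.length_nil] at h5 ⊢
              omega
            simp only [hb]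
            simpa using ih (result ++ [pvClean w]) hlt
      · rw [List.filter_cons_of_neg (p := fun w => pvKeep (pvClean w)) hk]
        simp only [pvAltLoop, hk]
        simpa using ih result h

theorem generate_tags_by_keywords_eq (title : String) :
    generate_tags_by_keywords title = generate_tags_by_keywords_alt title := by
  unfold generate_tags_by_keywords generate_tags_by_keywords_alt
  rw [pvAltLoop_eq _ [] (by simp)]
  simp only [PySem.List.foldl_append_if (fun w => pvKeep (pvClean w)) pvClean,
    PySem.List.dedup_eq_ofList, PySem.Set.update_nil_left, List.nil_append]

-- ===== VERDICT (by name: the statement is the Claim_ definition above) =====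
theorem generate_tags_by_keywords_spec : Claim_equal_generate_tags_by_keywords := by
  intro title _
  exact generate_tags_by_keywords_eq title
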